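-- pv_equiv track=rewrite | github.com/lfilipiak/excercism | Etl.py | transform
-- ===== SOURCE A (Python) =====
-- def transform(legacy_data):
--     list = []
--     value = {}
--
--     for x in legacy_data.values():
--         list.extend(x)
--
--     list.sort()
--
--     for element in list:
--         x = []
--         x = [k for k, v in legacy_data.items() if element in v]
--         value.update({element.lower(): x[0]})
--
--     return value
-- ===== SOURCE B (Python) =====
-- def transform(legacy_data):
--     first = {}
--     for score, letters in legacy_data.items():
--         for letter in letters:
--             if letter not in first:
--                 first[letter] = score
--     return {letter.lower(): first[letter] for letter in sorted(first)}
-- ===== Notes on version B (the rewrite author's own statement) =====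
-- stated objective: faster
-- what changed: Instead of sorting the full letter list and re-scanning the whole dict for every letter, B builds a letter-to-score dict of first matches in one pass and then sorts only the distinct letters.
import Mathlib
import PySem

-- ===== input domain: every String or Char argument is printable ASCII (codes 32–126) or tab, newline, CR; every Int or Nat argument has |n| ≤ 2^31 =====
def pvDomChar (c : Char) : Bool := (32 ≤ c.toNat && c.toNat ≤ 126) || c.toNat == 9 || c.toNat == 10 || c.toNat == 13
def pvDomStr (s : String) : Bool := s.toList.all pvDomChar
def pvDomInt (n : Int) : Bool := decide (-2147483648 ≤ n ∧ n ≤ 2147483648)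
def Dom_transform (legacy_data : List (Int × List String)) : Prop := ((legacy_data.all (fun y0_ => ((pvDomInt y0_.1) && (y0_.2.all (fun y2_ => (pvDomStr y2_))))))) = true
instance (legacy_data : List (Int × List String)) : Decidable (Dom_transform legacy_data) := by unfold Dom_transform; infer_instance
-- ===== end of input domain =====

-- B replaces A's per-letter scan of the whole dict by a one-pass first-match letter→score
-- dict followed by a sort of the distinct letters (objective: faster).

-- ===== PORT A =====
-- transliteration of Source A: flatten the values, sort, then for each letter take the first
-- key whose value list contains it and write it under letter.lower().
def transform (legacy_data : List (Int × List String)) : List (String × Int) :=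
  let lst : List String := legacy_data.foldl (fun acc p => acc ++ p.2) []
  let lst2 := PySem.List.sorted lst (fun s => s) false
  (lst2.foldl
    (fun (value : PySem.Dict String Int) element =>
      let x : List Int := (legacy_data.filter (fun p => decide (element ∈ p.2))).map Prod.fst
      -- x[0]: x is nonempty for every element of lst2 (each came from some value list), so headD 0 is exactly x[0]
      value.insert (PySem.Str.lower element) (x.headD 0))
    PySem.Dict.empty).items

-- ===== PORT B =====
-- transliteration of Source B: one pass filling first[letter] = score on first sight,
-- then a dict comprehension over sorted(first).
def transform_alt (legacy_data : List (Int × List String)) : List (String × Int) :=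
  let first : PySem.Dict String Int := legacy_data.foldl
    (fun f p => p.2.foldl (fun f letter => if f.contains letter then f else f.insert letter p.1) f)
    PySem.Dict.empty
  ((PySem.List.sorted first.keys (fun s => s) false).foldl
    (fun (r : PySem.Dict String Int) letter =>
      -- first[letter]: always present since letter ∈ first.keys, so getD 0 is exactly first[letter]
      r.insert (PySem.Str.lower letter) (first.getD letter 0))
    PySem.Dict.empty).items

-- ===== PRECONDITION & SPEC =====
-- Pre_ only states that the association list is a valid encoding of a Python dict (distinct
-- keys); a Python dict can never carry duplicate keys, so no input A returns on is excluded.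
def Pre_transform (legacy_data : List (Int × List String)) : Prop :=
  (legacy_data.map Prod.fst).Nodup
instance (legacy_data : List (Int × List String)) : Decidable (Pre_transform legacy_data) := by unfold Pre_transform; infer_instance
def pvWitness_transform : (List (Int × List String)) := [(2, ["A", "a", "b"]), (1, ["a", "C"])]

def Spec_transform (legacy_data : List (Int × List String)) (out : List (String × Int)) : Prop := out = transform_alt legacy_data
instance (legacy_data : List (Int × List String)) (out : List (String × Int)) : Decidable (Spec_transform legacy_data out) := by unfold Spec_transform; infer_instance

-- ===== CLAIM (what is proved, stated in full; the proofs are below) =====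
def Claim_equal_transform : Prop := ∀ (legacy_data : List (Int × List String)), Dom_transform legacy_data → Pre_transform legacy_data → Spec_transform legacy_data (transform legacy_data)

-- ===== LEMMAS AND PROOFS =====

-- the flattened value lists and the two dict-building step functions, for naming
def pvFlat (data : List (Int × List String)) : List String :=
  data.foldl (fun acc p => acc ++ p.2) []

def pvInner (k : Int) (f : PySem.Dict String Int) (v : List String) : PySem.Dict String Int :=
  v.foldl (fun f letter => if f.contains letter then f else f.insert letter k) f

def pvFirst (data : List (Int × List String)) : PySem.Dict String Int :=
  data.foldl (fun f p => pvInner p.1 f p.2) PySem.Dict.empty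

theorem transform_eq (data : List (Int × List String)) :
    transform data =
      ((PySem.List.sorted (pvFlat data) (fun s => s) false).foldl
        (fun value element =>
          value.insert (PySem.Str.lower element)
            (((data.filter (fun p => decide (element ∈ p.2))).map Prod.fst).headD 0))
        PySem.Dict.empty).items := rfl

theorem transform_alt_eq (data : List (Int × List String)) :
    transform_alt data =
      ((PySem.List.sorted (pvFirst data).keys (fun s => s) false).foldl
        (fun r letter => r.insert (PySem.Str.lower letter) ((pvFirst data).getD letter 0))
        PySem.Dict.empty).items := rfl

-- adjacent-duplicate removal (duplicates are adjacent in a sorted list)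
def pvCollapse : List String → List String
  | [] => []
  | [a] => [a]
  | a :: b :: t => if a = b then pvCollapse (b :: t) else a :: pvCollapse (b :: t)

theorem pvCollapse_head (a : String) (t : List String) :
    ∃ t', pvCollapse (a :: t) = a :: t' := by
  induction t generalizing a with
  | nil => exact ⟨[], rfl⟩
  | cons b t2 ih =>
    by_cases h : a = b
    · obtain ⟨t', ht'⟩ := ih b
      subst h
      exact ⟨t', by simp [pvCollapse, ht']⟩
    · exact ⟨pvCollapse (b :: t2), by simp [pvCollapse, h]⟩

theorem pvCollapse_mem (l : List String) (x : String) : x ∈ pvCollapse l ↔ x ∈ l := by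
  match l with
  | [] => simp [pvCollapse]
  | [a] => simp [pvCollapse]
  | a :: b :: t =>
    have ih := pvCollapse_mem (b :: t) x
    by_cases h : a = b
    · subst h; simp [pvCollapse, ih]
    · simp [pvCollapse, h, ih]

theorem pvCollapse_chain (l : List String) (h : l.Pairwise (· ≤ ·)) :
    (pvCollapse l).IsChain (· < ·) := by
  match l with
  | [] => simp [pvCollapse]
  | [a] => simp [pvCollapse]
  | a :: b :: t =>
    have hp : (b :: t).Pairwise (· ≤ ·) := h.tail
    have ih := pvCollapse_chain (b :: t) hp
    by_cases hab : a = b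
    · simpa [pvCollapse, hab] using ih
    · have hle : a ≤ b := (List.pairwise_cons.mp h).1 b (by simp)
      have hlt : a < b := lt_of_le_of_ne hle hab
      obtain ⟨t', ht'⟩ := pvCollapse_head b t
      simp only [pvCollapse, if_neg hab, ht']
      rw [ht'] at ih
      exact List.IsChain.cons ih (by intro y hy; simp at hy; subst hy; exact hlt)

theorem pvCollapse_pairwise (l : List String) (h : l.Pairwise (· ≤ ·)) :
    (pvCollapse l).Pairwise (· < ·) :=
  (List.isChain_iff_pairwise).mp (pvCollapse_chain l h)

-- folding an idempotent step over a sorted list ignores adjacent duplicates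
theorem pvFoldl_collapse (ins : PySem.Dict String Int → String → PySem.Dict String Int)
    (hid : ∀ d e, ins (ins d e) e = ins d e) :
    ∀ (l : List String) (d : PySem.Dict String Int),
      l.foldl ins d = (pvCollapse l).foldl ins d := by
  intro l
  match l with
  | [] => intro d; rfl
  | [a] => intro d; rfl
  | a :: b :: t =>
    intro d
    have ih := pvFoldl_collapse ins hid (b :: t)
    by_cases hab : a = b
    · subst hab
      have h1 : pvCollapse (a :: a :: t) = pvCollapse (a :: t) := by simp [pvCollapse]
      calc List.foldl ins d (a :: a :: t) = List.foldl ins (ins (ins d a) a) t := rfl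
        _ = List.foldl ins (ins d a) t := by rw [hid]
        _ = List.foldl ins d (a :: t) := rfl
        _ = List.foldl ins d (pvCollapse (a :: t)) := ih d
        _ = List.foldl ins d (pvCollapse (a :: a :: t)) := by rw [h1]
    · simp only [pvCollapse, if_neg hab, List.foldl_cons]
      exact ih (ins d a)

-- get? after the inner setdefault-style loop
theorem pvInner_get? (v : List String) (k : Int) (f : PySem.Dict String Int) (e : String) :
    (pvInner k f v).get? e =
      if (f.get? e).isSome then f.get? e else if e ∈ v then some k else none := by
  induction v generalizing f with
  | nil => cases h : f.get? e <;> simp [pvInner, h]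
  | cons l v' ih =>
    simp only [pvInner, List.foldl_cons] at *
    by_cases hc : f.contains l
    · rw [if_pos hc, ih f]
      by_cases hs : (f.get? e).isSome
      · simp [hs]
      · simp only [hs, if_neg, Bool.false_eq_true, not_false_eq_true]
        have hel : e ≠ l := by
          intro h; subst h
          rw [PySem.Dict.contains_eq_isSome_get?] at hc
          simp [hs] at hc
        simp [List.mem_cons, hel]
    · rw [if_neg (by simpa using hc), ih (f.insert l k)]
      by_cases hel : e = l
      · subst hel
        have hn : f.get? e = none := by
          rw [PySem.Dict.contains_eq_isSome_get?] at hc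
          exact Option.not_isSome_iff_eq_none.mp (by simpa using hc)
        simp [PySem.Dict.get?_insert_self, hn]
      · rw [PySem.Dict.get?_insert_of_ne f k hel]
        by_cases hs : (f.get? e).isSome <;> simp [hs, List.mem_cons, hel]

-- get? of the one-pass first-occurrence dict is the first matching key
theorem pvFirst_get?_aux (data : List (Int × List String)) (f : PySem.Dict String Int) (e : String) :
    (data.foldl (fun f p => pvInner p.1 f p.2) f).get? e =
      if (f.get? e).isSome then f.get? e
      else ((data.filter (fun p => decide (e ∈ p.2))).map Prod.fst).head? := by
  induction data generalizing f with
  | nil => cases h : f.get? e <;> simp [h]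
  | cons p rest ih =>
    simp only [List.foldl_cons]
    rw [ih (pvInner p.1 f p.2), pvInner_get? p.2 p.1 f e]
    by_cases hs : (f.get? e).isSome
    · simp [hs]
    · by_cases hm : e ∈ p.2 <;> simp [hs, hm]

theorem pvFirst_get? (data : List (Int × List String)) (e : String) :
    (pvFirst data).get? e = ((data.filter (fun p => decide (e ∈ p.2))).map Prod.fst).head? := by
  have := pvFirst_get?_aux data PySem.Dict.empty e
  simpa [pvFirst, PySem.Dict.get?_empty] using this

-- keys of the inner loop: Set.add for each letter
theorem pvInner_keys (v : List String) (k : Int) (f : PySem.Dict String Int) :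
    (pvInner k f v).keys = PySem.Set.update f.keys v := by
  induction v generalizing f with
  | nil => rfl
  | cons l v' ih =>
    simp only [pvInner, List.foldl_cons, PySem.Set.update] at *
    by_cases hc : f.contains l
    · rw [if_pos hc, ih f]
      have : PySem.Set.add f.keys l = f.keys := by
        simp [PySem.Set.add, PySem.Set.contains,
          (PySem.Dict.contains_iff_mem_keys f l).mp hc]
      rw [this]
    · have hcf : f.contains l = false := by simpa using hc
      rw [if_neg (by simp [hcf]), ih (f.insert l k),
        PySem.Dict.keys_insert_of_not_contains f k hcf]
      have : PySem.Set.add f.keys l = f.keys ++ [l] := by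
        have : l ∉ f.keys := fun h => hc ((PySem.Dict.contains_iff_mem_keys f l).mpr h)
        simp [PySem.Set.add, PySem.Set.contains, this]
      rw [this]

theorem pvFirst_keys_aux (data : List (Int × List String)) (f : PySem.Dict String Int) :
    (data.foldl (fun f p => pvInner p.1 f p.2) f).keys =
      PySem.Set.update f.keys (data.flatMap Prod.snd) := by
  induction data generalizing f with
  | nil => rfl
  | cons p rest ih =>
    simp only [List.foldl_cons, List.flatMap_cons]
    rw [ih (pvInner p.1 f p.2), pvInner_keys p.2 p.1 f]
    simp [PySem.Set.update, List.foldl_append]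

theorem pvFlat_eq (data : List (Int × List String)) :
    pvFlat data = data.flatMap Prod.snd := by
  simpa [pvFlat] using PySem.List.foldl_append_eq_flatMap (fun (p : Int × List String) => p.2) data []

theorem pvFirst_keys (data : List (Int × List String)) :
    (pvFirst data).keys = PySem.Set.ofList (pvFlat data) := by
  rw [pvFirst, pvFirst_keys_aux data PySem.Dict.empty, pvFlat_eq]
  rfl

-- ===== VERDICT (by name: the statement is the Claim_ definition above) =====
theorem transform_spec : Claim_equal_transform := by
  intro data _hdom _hpre
  unfold Spec_transform
  rw [transform_eq, transform_alt_eq]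
  set F : String → Int :=
    fun e => ((data.filter (fun p => decide (e ∈ p.2))).map Prod.fst).headD 0 with hF
  set ins : PySem.Dict String Int → String → PySem.Dict String Int :=
    fun d e => d.insert (PySem.Str.lower e) (F e) with hins
  -- B's per-letter value agrees with A's everywhere
  have hval : ∀ (r : PySem.Dict String Int) (e : String),
      r.insert (PySem.Str.lower e) ((pvFirst data).getD e 0) = ins r e := by
    intro r e
    have : (pvFirst data).getD e 0 = F e := by
      rw [PySem.Dict.getD_eq_get?_getD, pvFirst_get?, hF]
      simp [List.headD_eq_head?_getD]
    rw [this]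
  have hB :
      ((PySem.List.sorted (pvFirst data).keys (fun s => s) false).foldl
        (fun r letter => r.insert (PySem.Str.lower letter) ((pvFirst data).getD letter 0))
        PySem.Dict.empty)
      = ((PySem.List.sorted (pvFirst data).keys (fun s => s) false).foldl ins
        PySem.Dict.empty) := by
    congr 1; funext r e; exact hval r e
  -- collapse A's sorted letter list
  have hpw : (PySem.List.sorted (pvFlat data) (fun s => s) false).Pairwise (· ≤ ·) := by
    simpa using PySem.List.sorted_pairwise (pvFlat data) (fun s => s)
  have hid : ∀ d e, ins (ins d e) e = ins d e := by
    intro d e; simp [hins, PySem.Dict.insert_insert_self]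
  have hA := pvFoldl_collapse ins hid
    (PySem.List.sorted (pvFlat data) (fun s => s) false) PySem.Dict.empty
  -- the collapsed sorted list IS sorted(first.keys)
  have hD : PySem.List.sorted (pvFirst data).keys (fun s => s) false
      = pvCollapse (PySem.List.sorted (pvFlat data) (fun s => s) false) := by
    apply PySem.List.sorted_eq_of_perm_of_pairwise_lt
    · -- permutation: both nodup with the same members
      have hnd1 : (pvCollapse (PySem.List.sorted (pvFlat data) (fun s => s) false)).Nodup :=
        (pvCollapse_pairwise _ hpw).imp (fun h => ne_of_lt h)
      have hnd2 : ((pvFirst data).keys).Nodup := by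
        rw [pvFirst_keys]; exact PySem.Set.nodup_ofList _
      rw [List.perm_ext_iff_of_nodup hnd1 hnd2]
      intro a
      rw [pvCollapse_mem, PySem.List.mem_sorted, pvFirst_keys, PySem.Set.mem_ofList]
    · simpa using pvCollapse_pairwise _ hpw
  rw [hB, hD, ← hA]
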